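-- pv_equiv track=rewrite | github.com/shellfish007/Network | simulation.py | generateAllAttack
-- ===== SOURCE A (Python) =====
-- def generateAllAttack(graph:dict,T):
--     # all possible seqs for attacker
--
--     edges = []
--     for point in graph:
--         for neighbor in graph[point]:
--             if point > neighbor: continue
--             edges.append([point,neighbor])
--     attackList:list = []
--     for edge in edges:
--         attackList.append([edge])
--     for i in range(T-1):
--         tempAttack = []
--         for edge in edges:
--             for attack in attackList:
--                 attack_copy = list(attack)
--                 attack_copy.append(edge)
--                 tempAttack.append(attack_copy)
--         attackList = tempAttack
--     return attackList
-- ===== SOURCE B (Python) =====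
-- def generateAllAttack(graph: dict, T):
--     # all possible seqs for attacker, by mixed-radix index decoding
--     edges = []
--     for point in graph:
--         for neighbor in graph[point]:
--             if point > neighbor: continue
--             edges.append([point, neighbor])
--     n = len(edges)
--     L = max(T, 1)
--     result = []
--     for idx in range(n ** L):
--         seq = []
--         x = idx
--         for _ in range(L):
--             seq.append(edges[x % n])
--             x //= n
--         result.append(seq)
--     return result
-- ===== Notes on version B (the rewrite author's own statement) =====
-- stated objective: alternative
-- what changed: Replaces the level-by-level accumulation of T lists (rebuilding all intermediate attack lists with repeated copying) by a single pass over indices 0..len(edges)**max(T,1)-1 that decodes each index as mixed-radix digits picking one edge per position, emitting every sequence directly in A's order.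
import Mathlib
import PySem

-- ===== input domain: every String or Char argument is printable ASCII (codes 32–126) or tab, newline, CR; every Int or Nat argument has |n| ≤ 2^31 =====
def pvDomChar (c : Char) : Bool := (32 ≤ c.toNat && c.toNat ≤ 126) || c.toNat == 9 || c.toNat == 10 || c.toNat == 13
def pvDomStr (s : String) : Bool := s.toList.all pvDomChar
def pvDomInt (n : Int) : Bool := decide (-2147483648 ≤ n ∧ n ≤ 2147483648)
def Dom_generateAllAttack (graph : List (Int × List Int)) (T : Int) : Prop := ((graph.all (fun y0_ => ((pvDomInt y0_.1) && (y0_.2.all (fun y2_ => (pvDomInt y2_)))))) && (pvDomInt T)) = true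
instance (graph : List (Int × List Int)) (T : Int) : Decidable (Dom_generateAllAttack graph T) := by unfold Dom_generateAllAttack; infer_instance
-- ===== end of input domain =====

-- B replaces A's level-by-level product accumulation by direct mixed-radix decoding of
-- sequence indices (alternative algorithm, same output in the same order).


-- ===== PORT A =====
-- 'for point in graph: for neighbor in graph[point]: …' — the dict's keys are unique, so
-- iterating keys and looking each one up is iterating the items of dict(graph).
def pvEdgesA (graph : List (Int × List Int)) : List (List Int) :=
  (PySem.Dict.ofList graph).items.foldl
    (fun edges pn =>
      pn.2.foldl
        (fun edges2 neighbor =>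
          if pn.1 > neighbor then edges2 else edges2 ++ [[pn.1, neighbor]])
        edges)
    []

def generateAllAttack (graph : List (Int × List Int)) (T : Int) : List (List (List Int)) :=
  let edges := pvEdgesA graph
  let attackList := edges.foldl (fun al edge => al ++ [[edge]]) []
  (PySem.List.pyRange 0 (T - 1) 1).foldl
    (fun al _i =>
      edges.foldl
        (fun temp edge => al.foldl (fun t attack => t ++ [attack ++ [edge]]) temp)
        [])
    attackList

-- ===== PORT B =====
def pvEdgesB (graph : List (Int × List Int)) : List (List Int) :=
  (PySem.Dict.ofList graph).items.foldl
    (fun edges pn =>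
      pn.2.foldl
        (fun edges2 neighbor =>
          if pn.1 > neighbor then edges2 else edges2 ++ [[pn.1, neighbor]])
        edges)
    []

-- 'edges[x % n]' never raises when the loop body runs (the outer range is empty for n = 0),
-- so the '.getD []' default of the total Lean indexing is unreachable.
def generateAllAttack_alt (graph : List (Int × List Int)) (T : Int) : List (List (List Int)) :=
  let edges := pvEdgesB graph
  let n : Int := edges.length
  let L : Int := max T 1
  (PySem.List.pyRange 0 (n ^ L.toNat) 1).foldl
    (fun result idx =>
      let sx :=
        (PySem.List.pyRange 0 L 1).foldl
          (fun (sx : List (List Int) × Int) _ =>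
            (sx.1 ++ [(PySem.List.pyGet? edges (PySem.Int.mod sx.2 n)).getD []],
             PySem.Int.floordiv sx.2 n))
          ([], idx)
      result ++ [sx.1])
    []

-- ===== PRECONDITION & SPEC =====
def Spec_generateAllAttack (graph : List (Int × List Int)) (T : Int) (out : List (List (List Int))) : Prop := out = generateAllAttack_alt graph T
instance (graph : List (Int × List Int)) (T : Int) (out : List (List (List Int))) : Decidable (Spec_generateAllAttack graph T out) := by unfold Spec_generateAllAttack; infer_instance

-- ===== CLAIM (what is proved, stated in full; the proofs are below) =====
def Claim_equal_generateAllAttack : Prop := ∀ (graph : List (Int × List Int)) (T : Int), Dom_generateAllAttack graph T → Spec_generateAllAttack graph T (generateAllAttack graph T)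

-- ===== LEMMAS AND PROOFS =====

-- sequence decoded from index x in base n = es.length, least-significant digit first
def pvSeq (es : List (List Int)) : Nat → Nat → List (List Int)
  | 0, _ => []
  | m + 1, x => (es[x % es.length]?).getD [] :: pvSeq es m (x / es.length)

theorem pv_flatMap_congr {α β : Type} {l : List α} {f g : α → List β}
    (h : ∀ a ∈ l, f a = g a) : l.flatMap f = l.flatMap g := by
  induction l with
  | nil => rfl
  | cons a l ih =>
      simp only [List.flatMap_cons, h a (List.mem_cons_self), ih (fun x hx => h x (List.mem_cons_of_mem a hx))]

theorem pv_self_eq_map_range (es : List (List Int)) :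
    es = (List.range es.length).map (fun i => (es[i]?).getD []) := by
  apply List.ext_getElem
  · simp
  · intro i h1 h2
    simp at h2 ⊢
    rw [List.getElem?_eq_getElem (by simpa using h2)]
    rfl

theorem pv_flatMap_of_get {β : Type} (es : List (List Int)) (g : List Int → List β) :
    es.flatMap g = (List.range es.length).flatMap (fun d => g ((es[d]?).getD [])) := by
  conv_lhs => rw [pv_self_eq_map_range es]
  rw [List.flatMap_map]

-- one iteration of A's outer loop
def pvStep (es : List (List Int)) (al : List (List (List Int))) : List (List (List Int)) :=
  es.flatMap (fun e => al.map (· ++ [e]))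

theorem pv_edges_eq (graph : List (Int × List Int)) : pvEdgesB graph = pvEdgesA graph := rfl

theorem pv_foldl_const {α β : Type} (l : List α) (g : β → β) (init : β) :
    l.foldl (fun s _ => g s) init = g^[l.length] init := by
  induction l generalizing init with
  | nil => rfl
  | cons a l ih =>
      simp [List.foldl_cons, ih, Function.iterate_succ_apply]

theorem pv_A_eq (graph : List (Int × List Int)) (T : Int) :
    generateAllAttack graph T =
      (pvStep (pvEdgesA graph))^[(T - 1).toNat]
        ((pvEdgesA graph).map (fun e => [e])) := by
  unfold generateAllAttack
  simp only [PySem.List.foldl_append_singleton_eq_map, PySem.List.foldl_append_eq_flatMap,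
    List.nil_append]
  rw [show ((T : Int) - 1).toNat = (PySem.List.pyRange 0 (T - 1) 1).length from by
    rw [PySem.List.length_pyRange_one]; norm_num]
  rw [← pv_foldl_const]
  rfl

theorem pv_inner_fold (es : List (List Int)) (l : List Int)
    (acc : List (List Int)) (j : Nat) :
    l.foldl
      (fun (sx : List (List Int) × Int) _ =>
        (sx.1 ++ [(PySem.List.pyGet? es (PySem.Int.mod sx.2 (es.length : Int))).getD []],
         PySem.Int.floordiv sx.2 (es.length : Int)))
      (acc, (j : Int)) =
    (acc ++ pvSeq es l.length j, ((j / es.length ^ l.length : Nat) : Int)) := by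
  induction l generalizing acc j with
  | nil => simp [pvSeq]
  | cons a l ih =>
      simp only [List.foldl_cons, PySem.Int.mod_natCast, PySem.Int.floordiv_natCast,
        PySem.List.pyGet?_natCast]
      rw [ih]
      have hseq : pvSeq es (l.length + 1) j =
          (es[j % es.length]?).getD [] :: pvSeq es l.length (j / es.length) := rfl
      have hdiv : j / es.length / es.length ^ l.length = j / es.length ^ (l.length + 1) := by
        rw [Nat.div_div_eq_div_mul, pow_succ']
      simp [hseq, hdiv]

theorem pv_B_eq (graph : List (Int × List Int)) (T : Int) :
    generateAllAttack_alt graph T =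
      (List.range ((pvEdgesA graph).length ^ (max T 1).toNat)).map
        (fun j => pvSeq (pvEdgesA graph) (max T 1).toNat j) := by
  unfold generateAllAttack_alt
  simp only [pv_edges_eq]
  simp only [PySem.List.foldl_append_singleton_eq_map, List.nil_append]
  rw [PySem.List.pyRange_one,
    PySem.List.pyRange_one 0 (((pvEdgesA graph).length : Int) ^ (max T 1).toNat),
    List.map_map]
  have hb : ((pvEdgesA graph).length : Int) ^ (max T 1).toNat - 0 =
      (((pvEdgesA graph).length ^ (max T 1).toNat : Nat) : Int) := by push_cast; ring
  rw [hb, Int.toNat_natCast]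
  apply List.map_congr_left
  intro k _
  simp only [Function.comp_apply, zero_add]
  rw [pv_inner_fold]
  simp

theorem pv_range_mul {α : Type} (n m : Nat) (f : Nat → α) :
    (List.range (n * m)).map f =
      (List.range n).flatMap (fun d => (List.range m).map (fun r => f (d * m + r))) := by
  induction n with
  | zero => simp
  | succ n ih =>
      have h : (n + 1) * m = n * m + m := by ring
      rw [h, List.range_add, List.map_append, List.map_map, List.range_succ,
        List.flatMap_append, ih]
      simp [Function.comp]

theorem pv_seq_split (es : List (List Int)) (k d r : Nat) (hr : r < es.length ^ k) :
    pvSeq es (k + 1) (d * es.length ^ k + r) =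
      pvSeq es k r ++ [(es[d % es.length]?).getD []] := by
  induction k generalizing r with
  | zero =>
      have h0 : r = 0 := by
        have := hr; simp only [pow_zero] at this; omega
      subst h0
      simp [pvSeq]
  | succ k ih =>
      have hn : 0 < es.length := by
        by_contra h
        have : es.length = 0 := by omega
        simp [this] at hr
      have h1 : (d * es.length ^ (k + 1) + r) % es.length = r % es.length := by
        rw [Nat.add_comm, pow_succ, ← Nat.mul_assoc, Nat.add_mul_mod_self_right]
      have h2 : (d * es.length ^ (k + 1) + r) / es.length = d * es.length ^ k + r / es.length := by
        rw [Nat.add_comm, pow_succ, ← Nat.mul_assoc, Nat.add_mul_div_right _ _ hn, Nat.add_comm]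
      have hr' : r / es.length < es.length ^ k := by
        rw [Nat.div_lt_iff_lt_mul hn, ← pow_succ]; exact hr
      have lhs : pvSeq es (k + 1 + 1) (d * es.length ^ (k + 1) + r) =
          (es[(d * es.length ^ (k + 1) + r) % es.length]?).getD [] ::
            pvSeq es (k + 1) ((d * es.length ^ (k + 1) + r) / es.length) := rfl
      have rhs : pvSeq es (k + 1) r =
          (es[r % es.length]?).getD [] :: pvSeq es k (r / es.length) := rfl
      rw [lhs, h1, h2, ih _ hr', rhs]
      simp


theorem pv_main (es : List (List Int)) (k : Nat) :
    (List.range (es.length ^ (k + 1))).map (fun j => pvSeq es (k + 1) j) =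
      (pvStep es)^[k] (es.map (fun e => [e])) := by
  induction k with
  | zero =>
      simp only [Function.iterate_zero, id_eq, Nat.zero_add, pow_one]
      conv_rhs => rw [pv_self_eq_map_range es]
      rw [List.map_map]
      apply List.map_congr_left
      intro j hj
      rw [List.mem_range] at hj
      show pvSeq es 1 j = _
      have : pvSeq es 1 j = [(es[j % es.length]?).getD []] := rfl
      rw [this, Nat.mod_eq_of_lt hj]
      rfl
  | succ k ih =>
      rw [Function.iterate_succ_apply', ← ih, pvStep, pv_flatMap_of_get]
      have hpow : es.length ^ (k + 1 + 1) = es.length * es.length ^ (k + 1) := by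
        rw [pow_succ']
      rw [hpow, pv_range_mul]
      apply pv_flatMap_congr
      intro d hd
      rw [List.mem_range] at hd
      rw [List.map_map]
      apply List.map_congr_left
      intro r hr
      rw [List.mem_range] at hr
      show pvSeq es (k + 1 + 1) (d * es.length ^ (k + 1) + r) = _
      rw [pv_seq_split es (k + 1) d r hr, Nat.mod_eq_of_lt hd]
      rfl

theorem pv_toNat_max (T : Int) : (max T 1).toNat = (T - 1).toNat + 1 := by
  rcases le_total T 1 with h | h
  · rw [max_eq_right h]; omega
  · rw [max_eq_left h]; omega

-- ===== VERDICT (by name: the statement is the Claim_ definition above) =====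
theorem generateAllAttack_spec : Claim_equal_generateAllAttack := by
  intro graph T _
  unfold Spec_generateAllAttack
  rw [pv_A_eq, pv_B_eq, pv_toNat_max, pv_main]
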